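-- pv_equiv track=rewrite | github.com/IzzleNizzle/python-react-time-tracker | app/app.py | list_to_tuples
-- ===== SOURCE A (Python) =====
-- def list_to_tuples(lst, newest_index, oldest_index):
--     return [
--         (
--             (newest_index, lst[i])
--             if i == 0
--             else (lst[i], lst[i + 1] if i + 1 < len(lst) else oldest_index)
--         )
--         for i in range(len(lst))
--     ]
-- ===== SOURCE B (Python) =====
-- def list_to_tuples(lst, newest_index, oldest_index):
--     # index-free: pair each tail element with its successor by zipping two shifted slices,
--     # with oldest_index appended as the successor of the last element
--     if not lst:
--         return []
--     return [(newest_index, lst[0])] + list(zip(lst[1:], lst[2:] + [oldest_index]))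
-- ===== Notes on version B (the rewrite author's own statement) =====
-- stated objective: idiomatic
-- what changed: B has no index variable or range loop at all: it emits the head pair and zips the two shifted slices lst[1:] and lst[2:]+[oldest_index], where A indexes into the list inside a range(len(lst)) comprehension with i==0 / i+1<len branches.
import Mathlib
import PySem

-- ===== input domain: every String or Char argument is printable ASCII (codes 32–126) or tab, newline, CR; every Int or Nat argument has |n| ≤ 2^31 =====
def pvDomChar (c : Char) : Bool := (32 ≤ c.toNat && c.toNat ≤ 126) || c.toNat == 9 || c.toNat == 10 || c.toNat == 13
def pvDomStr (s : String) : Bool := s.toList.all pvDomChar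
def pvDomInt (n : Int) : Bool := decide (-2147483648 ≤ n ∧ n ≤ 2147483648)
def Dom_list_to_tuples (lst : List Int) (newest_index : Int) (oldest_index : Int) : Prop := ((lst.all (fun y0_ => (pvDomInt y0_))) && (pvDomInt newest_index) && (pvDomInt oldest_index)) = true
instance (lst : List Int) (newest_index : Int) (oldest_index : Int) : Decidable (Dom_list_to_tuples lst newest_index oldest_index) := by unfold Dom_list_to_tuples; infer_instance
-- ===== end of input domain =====

-- B is index-free: the head pair followed by zipping the shifted slices lst[1:] and lst[2:]+[oldest_index],
-- where A indexes into lst inside a range(len) comprehension (objective: idiomatic; return value only).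


-- ===== PORT A =====
def list_to_tuples (lst : List Int) (newest_index : Int) (oldest_index : Int) : List (Int × Int) :=
  (PySem.List.pyRange 0 (lst.length : Int) 1).map (fun i =>
    if i = 0 then (newest_index, PySem.List.pyGetD lst i 0)
    else (PySem.List.pyGetD lst i 0,
          if i + 1 < (lst.length : Int) then PySem.List.pyGetD lst (i + 1) 0 else oldest_index))

-- ===== PORT B =====
-- lst[1:] and lst[2:] on a list are exactly List.drop 1 / List.drop 2; zip is List.zip
def list_to_tuples_alt (lst : List Int) (newest_index : Int) (oldest_index : Int) : List (Int × Int) :=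
  if lst = [] then []
  else
    (newest_index, PySem.List.pyGetD lst 0 0) ::
      List.zip (lst.drop 1) (lst.drop 2 ++ [oldest_index])

-- ===== PRECONDITION & SPEC =====
def Spec_list_to_tuples (lst : List Int) (newest_index : Int) (oldest_index : Int) (out : List (Int × Int)) : Prop := out = list_to_tuples_alt lst newest_index oldest_index
instance (lst : List Int) (newest_index : Int) (oldest_index : Int) (out : List (Int × Int)) : Decidable (Spec_list_to_tuples lst newest_index oldest_index out) := by unfold Spec_list_to_tuples; infer_instance

-- ===== CLAIM (what is proved, stated in full; the proofs are below) =====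
def Claim_equal_list_to_tuples : Prop := ∀ (lst : List Int) (newest_index : Int) (oldest_index : Int), Dom_list_to_tuples lst newest_index oldest_index → Spec_list_to_tuples lst newest_index oldest_index (list_to_tuples lst newest_index oldest_index)

-- ===== LEMMAS AND PROOFS =====

-- A's tail of the comprehension (indices 1..n-1) equals B's zip of shifted slices
theorem tail_map_eq_zip (x oldest_index : Int) (xs : List Int) :
    (PySem.List.pyRange 1 ((x :: xs).length : Int) 1).map (fun i =>
        if i = 0 then ((0 : Int), (0 : Int))
        else (PySem.List.pyGetD (x :: xs) i 0,
              if i + 1 < ((x :: xs).length : Int) then PySem.List.pyGetD (x :: xs) (i + 1) 0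
              else oldest_index))
      = List.zip xs (xs.drop 1 ++ [oldest_index]) := by
  apply List.ext_getElem
  · simp [PySem.List.length_pyRange_one]
    omega
  · intro k hk1 hk2
    have hklt : k < xs.length := by
      rw [List.length_map, PySem.List.length_pyRange_one, List.length_cons] at hk1
      omega
    rw [List.getElem_map, PySem.List.getElem_pyRange_one, List.getElem_zip]
    have hne : (1 : Int) + k ≠ 0 := by omega
    rw [if_neg hne]
    have hfst : PySem.List.pyGetD (x :: xs) (1 + (k : Int)) 0 = xs[k] := by
      rw [PySem.List.pyGetD_eq_getElem _ 0 (by omega) (by push_cast [List.length_cons]; omega)]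
      have : ((1 : Int) + k).toNat = k + 1 := by omega
      simp [this]
    rw [hfst]
    refine congrArg₂ Prod.mk rfl ?_
    by_cases hb : k + 1 < xs.length
    · have hcond : (1 : Int) + k + 1 < ((x :: xs).length : Int) := by
        push_cast [List.length_cons]; omega
      rw [if_pos hcond,
          PySem.List.pyGetD_eq_getElem _ 0 (by omega) (by push_cast [List.length_cons]; omega)]
      rw [List.getElem_append_left (by rw [List.length_drop]; omega)]
      have ht : ((1 : Int) + k + 1).toNat = k + 2 := by omega
      simp [ht]
    · have hcond : ¬ ((1 : Int) + k + 1 < ((x :: xs).length : Int)) := by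
        push_cast [List.length_cons]; omega
      rw [if_neg hcond]
      rw [List.getElem_append_right (by rw [List.length_drop]; omega)]
      simp

-- ===== VERDICT (by name: the statement is the Claim_ definition above) =====
theorem list_to_tuples_spec : Claim_equal_list_to_tuples := by
  intro lst newest_index oldest_index _
  unfold Spec_list_to_tuples list_to_tuples list_to_tuples_alt
  by_cases h : lst = []
  · subst h
    simp [PySem.List.pyRange_one_eq_nil]
  · obtain ⟨x, xs, rfl⟩ := List.exists_cons_of_ne_nil h
    rw [if_neg h]
    have hlen : (0 : Int) < ((x :: xs).length : Int) := by simp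
    rw [PySem.List.pyRange_one_cons hlen, List.map_cons]
    simp only [List.drop_succ_cons, List.drop_zero, zero_add]
    refine congrArg₂ List.cons (by simp [PySem.List.pyGetD_zero_cons]) ?_
    rw [← tail_map_eq_zip x oldest_index xs]
    refine List.map_congr_left ?_
    intro i hi
    rw [PySem.List.mem_pyRange_one] at hi
    have : i ≠ 0 := by omega
    simp [this]
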